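-- pv_equiv track=rewrite | github.com/yongu2000/algorithm | 프로그래머스/Lv3/숫자 게임.py | solution
-- ===== SOURCE A (Python) =====
-- from collections import defaultdict
-- from bisect import bisect_left
--
-- def solution(A, B):
--     answer = 0
--
--     A.sort()
--     B.sort()
--
--     data = defaultdict(int)
--     for a in A:
--         data[a] += 1
--
--     for b in B:
--         max_win = bisect_left(A, b) - 1
--
--         while max_win >= 0:
--             if data[A[max_win]] > 0:
--                 data[A[max_win]] -= 1
--                 answer += 1
--                 break
--             max_win -= 1
--
--     return answer
-- ===== SOURCE B (Python) =====
-- def solution(A, B):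
--     # two-pointer greedy over sorted copies (return value only; unlike A, B does
--     # not sort the caller's lists in place)
--     sa = sorted(A)
--     answer = 0
--     for b in sorted(B):
--         if answer < len(sa) and sa[answer] < b:
--             answer += 1
--     return answer
-- ===== Notes on version B (the rewrite author's own statement) =====
-- stated objective: faster
-- what changed: Replaced A's per-element bisect plus downward scan over a count dict by a single two-pointer pass over the two sorted lists.
import Mathlib
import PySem

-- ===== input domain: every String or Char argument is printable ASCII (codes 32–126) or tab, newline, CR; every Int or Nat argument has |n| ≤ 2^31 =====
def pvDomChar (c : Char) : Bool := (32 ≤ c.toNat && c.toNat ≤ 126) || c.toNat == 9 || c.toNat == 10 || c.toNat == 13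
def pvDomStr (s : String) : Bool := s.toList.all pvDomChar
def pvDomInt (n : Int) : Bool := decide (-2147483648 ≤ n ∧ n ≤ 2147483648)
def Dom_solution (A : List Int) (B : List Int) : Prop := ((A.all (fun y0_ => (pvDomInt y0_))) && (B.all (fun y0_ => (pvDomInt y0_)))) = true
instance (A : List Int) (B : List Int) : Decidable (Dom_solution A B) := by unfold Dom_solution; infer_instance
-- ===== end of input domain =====

-- B replaces A's per-b bisect + downward dict-count scan by a single two-pointer pass
-- over the two sorted lists (objective: faster). A sorts its arguments in place; the
-- equivalence proved here is about the RETURN value only (B does not mutate its arguments).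

-- ===== PORT A =====
-- 'while max_win >= 0: …' loop of A, with k = max_win + 1 (so k = 0 ⇔ max_win = -1).
-- Returns the updated dict and 1 if the loop hit 'break' (answer += 1), else 0.
-- sa.getD j 0 is A[max_win]: here max_win < bisect_left(A, b) ≤ len(A), so the index
-- is always in range and getD is exact.
def solutionWhile (sa : List Int) (d : PySem.Dict Int Int) : Nat → PySem.Dict Int Int × Int
  | 0 => (d, 0)
  | j+1 =>
    if 0 < PySem.Dict.getD d (sa.getD j 0) 0 then
      (PySem.Dict.insert d (sa.getD j 0) (PySem.Dict.getD d (sa.getD j 0) 0 - 1), 1)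
    else solutionWhile sa d j

def solution (A : List Int) (B : List Int) : Int :=
  let sa := PySem.List.sorted A (fun x => x)      -- A.sort()  (in place in Python)
  let sb := PySem.List.sorted B (fun x => x)      -- B.sort()
  -- data = defaultdict(int); for a in A: data[a] += 1   (A is already sorted here)
  let data := sa.foldl (fun d a => PySem.Dict.insert d a (PySem.Dict.getD d a 0 + 1)) PySem.Dict.empty
  -- for b in B: max_win = bisect_left(A, b) - 1; while …
  (sb.foldl (fun st b =>
      let r := solutionWhile sa st.1 (PySem.List.bisectLeft sa b)
      (r.1, st.2 + r.2)) (data, (0 : Int))).2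

-- ===== PORT B =====
-- answer doubles as the pointer into sorted(A): sa.getD answer 0 is sa[answer],
-- guarded by answer < len(sa), so getD is exact.
def solution_alt (A : List Int) (B : List Int) : Int :=
  let sa := PySem.List.sorted A (fun x => x)
  ((PySem.List.sorted B (fun x => x)).foldl
    (fun (ans : Nat) b => if ans < sa.length ∧ sa.getD ans 0 < b then ans + 1 else ans) 0 : Nat)

-- ===== PRECONDITION & SPEC =====
def Spec_solution (A : List Int) (B : List Int) (out : Int) : Prop := out = solution_alt A B
instance (A : List Int) (B : List Int) (out : Int) : Decidable (Spec_solution A B out) := by unfold Spec_solution; infer_instance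

-- ===== CLAIM (what is proved, stated in full; the proofs are below) =====
def Claim_equal_solution : Prop := ∀ (A : List Int) (B : List Int), Dom_solution A B → Spec_solution A B (solution A B)

-- ===== LEMMAS AND PROOFS =====

-- Abstract model of A's per-b step: remove the largest remaining element < b (the
-- remaining elements r are kept as a sorted list), bumping the answer on success.
def absStep (st : List Int × Int) (b : Int) : List Int × Int :=
  let k := st.1.countP (fun a => decide (a < b))
  if k = 0 then st else (st.1.erase (st.1.getD (k-1) 0), st.2 + 1)

-- B's per-b step (textually the fold function of solution_alt).
def bStep (sa : List Int) (ans : Nat) (b : Int) : Nat :=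
  if ans < sa.length ∧ sa.getD ans 0 < b then ans + 1 else ans

lemma sorted_getD_mono {l : List Int} (h : l.Pairwise (· ≤ ·)) {i j : Nat}
    (hij : i ≤ j) (hj : j < l.length) : l.getD i 0 ≤ l.getD j 0 := by
  rcases Nat.eq_or_lt_of_le hij with rfl | hlt
  · exact le_refl _
  · rw [List.getD_eq_getElem _ _ (lt_trans hlt hj), List.getD_eq_getElem _ _ hj]
    exact List.pairwise_iff_getElem.mp h i j (lt_trans hlt hj) hj hlt

lemma countP_lt_lb {l : List Int} {x : Int} (h : l.Pairwise (· ≤ ·)) {j : Nat}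
    (hj : j < l.countP (fun a => decide (a < x))) : j < l.length ∧ l.getD j 0 < x := by
  induction l generalizing j with
  | nil => simp at hj
  | cons a t ih =>
    rcases List.pairwise_cons.mp h with ⟨ha, ht⟩
    by_cases hax : a < x
    · rw [List.countP_cons] at hj
      simp [hax] at hj
      cases j with
      | zero => exact ⟨Nat.succ_pos _, by simpa using hax⟩
      | succ j' =>
        have := ih (j := j') ht (by omega)
        exact ⟨by simpa using this.1, by simpa using this.2⟩
    · exfalso
      have hz : t.countP (fun a => decide (a < x)) = 0 := by
        rw [List.countP_eq_zero]
        intro w hw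
        simp only [decide_eq_true_eq]
        exact fun hwx => hax (lt_of_le_of_lt (ha w hw) hwx)
      rw [List.countP_cons] at hj
      simp [hax, hz] at hj

lemma countP_lt_ub {l : List Int} {x : Int} (h : l.Pairwise (· ≤ ·)) {j : Nat}
    (hjl : j < l.length) (hj : l.countP (fun a => decide (a < x)) ≤ j) : x ≤ l.getD j 0 := by
  induction l generalizing j with
  | nil => simp at hjl
  | cons a t ih =>
    rcases List.pairwise_cons.mp h with ⟨ha, ht⟩
    by_cases hax : a < x
    · rw [List.countP_cons] at hj
      simp [hax] at hj
      cases j with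
      | zero => omega
      | succ j' =>
        have := ih (j := j') ht (by simpa using hjl) (by omega)
        simpa using this
    · cases j with
      | zero => simpa using not_lt.mp hax
      | succ j' =>
        have hmem : t.getD j' 0 ∈ t := by
          have hl : j' < t.length := by simpa using hjl
          rw [List.getD_eq_getElem _ _ hl]; exact List.getElem_mem hl
        have : a ≤ t.getD j' 0 := ha _ hmem
        have : x ≤ t.getD j' 0 := le_trans (not_lt.mp hax) this
        simpa using this

-- the element A's downward scan removes: the largest remaining element < b
lemma max_lt_spec {r : List Int} {b : Int} (hr : r.Pairwise (· ≤ ·))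
    (hk : 0 < r.countP (fun a => decide (a < b))) :
    (r.getD (r.countP (fun a => decide (a < b)) - 1) 0 ∈ r) ∧
    (r.getD (r.countP (fun a => decide (a < b)) - 1) 0 < b) ∧
    (∀ w ∈ r, w < b → w ≤ r.getD (r.countP (fun a => decide (a < b)) - 1) 0) := by
  set k := r.countP (fun a => decide (a < b)) with hkdef
  have h1 := countP_lt_lb (x := b) hr (j := k - 1) (by omega)
  refine ⟨?_, h1.2, ?_⟩
  · rw [List.getD_eq_getElem _ _ h1.1]; exact List.getElem_mem h1.1
  · intro w hw hwb
    rcases List.mem_iff_getElem.mp hw with ⟨jw, hjw, rfl⟩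
    by_cases hj : jw ≤ k - 1
    · rw [← List.getD_eq_getElem r 0 hjw]
      exact sorted_getD_mono hr hj h1.1
    · exfalso
      have := countP_lt_ub (x := b) hr hjw (by omega)
      rw [List.getD_eq_getElem _ _ hjw] at this
      omega

lemma countP_erase {r : List Int} {m : Int} (hm : m ∈ r) (p : Int → Bool) (hpm : p m = true) :
    (r.erase m).countP p = r.countP p - 1 ∧ 0 < r.countP p := by
  have hperm := List.perm_cons_erase hm
  have := hperm.countP_eq p
  rw [List.countP_cons] at this
  simp [hpm] at this
  omega

-- the while loop computes exactly absStep, tracked through the count dict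
lemma whileWin_eq (sa r : List Int) (d : PySem.Dict Int Int) (b ans : Int)
    (hsa : sa.Pairwise (· ≤ ·)) (hr : r.Pairwise (· ≤ ·))
    (hd : ∀ v, PySem.Dict.getD d v 0 = (r.count v : Int)) :
    ∀ k : Nat, (∀ j, j < k → j < sa.length ∧ sa.getD j 0 < b) →
    (∀ w ∈ r, w < b → ∃ j, j < k ∧ sa.getD j 0 = w) →
    (∀ v, PySem.Dict.getD (solutionWhile sa d k).1 v 0 = (((absStep (r, ans) b).1).count v : Int)) ∧
    ans + (solutionWhile sa d k).2 = (absStep (r, ans) b).2 := by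
  intro k
  induction k with
  | zero =>
    intro _ hcov
    have hk0 : r.countP (fun a => decide (a < b)) = 0 := by
      rw [List.countP_eq_zero]
      intro w hw
      simp only [decide_eq_true_eq]
      intro hwb
      rcases hcov w hw hwb with ⟨j, hj, _⟩
      omega
    simp [solutionWhile, absStep, hk0, hd]
  | succ j ih =>
    intro hlt hcov
    have hjlt := hlt j (by omega)
    set v := sa.getD j 0 with hv
    by_cases hpos : 0 < PySem.Dict.getD d v 0
    · -- break branch: decrement the count of v, answer += 1
      have hcv : 0 < r.count v := by
        have := hd v; omega
      have hvr : v ∈ r := List.count_pos_iff.mp hcv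
      have hk : 0 < r.countP (fun a => decide (a < b)) := by
        rw [List.countP_pos_iff]
        exact ⟨v, hvr, by simpa using hjlt.2⟩
      rcases max_lt_spec hr hk with ⟨hmmem, hmlt, hmmax⟩
      set m := r.getD (r.countP (fun a => decide (a < b)) - 1) 0 with hm
      have hmv : m = v := by
        rcases hcov m hmmem hmlt with ⟨jm, hjm, hjmv⟩
        have h1 : m ≤ v := by
          rw [← hjmv]
          exact sorted_getD_mono hsa (by omega) hjlt.1
        exact le_antisymm h1 (hmmax v hvr hjlt.2)
      have hstep : absStep (r, ans) b = (r.erase m, ans + 1) := by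
        simp only [absStep]
        rw [if_neg (by omega)]
      constructor
      · intro w
        simp only [solutionWhile, hstep]
        rw [← hv, if_pos hpos]
        rw [PySem.Dict.getD_insert]
        by_cases hwv : w = v
        · subst hwv
          rw [if_pos rfl, hmv, List.count_erase_self, hd]
          omega
        · rw [if_neg hwv, hmv, List.count_erase_of_ne hwv, hd]
      · simp only [solutionWhile, hstep]
        rw [← hv, if_pos hpos]
    · -- scan continues: data[A[max_win]] == 0, so v is not in the remaining multiset
      have hcv : r.count v = 0 := by
        have := hd v; omega
      have hvr : v ∉ r := by
        intro hmem
        exact absurd (List.count_pos_iff.mpr hmem) (by omega)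
      have hcov' : ∀ w ∈ r, w < b → ∃ i, i < j ∧ sa.getD i 0 = w := by
        intro w hw hwb
        rcases hcov w hw hwb with ⟨i, hi, hiv⟩
        rcases Nat.lt_succ_iff_lt_or_eq.mp hi with hlt' | rfl
        · exact ⟨i, hlt', hiv⟩
        · refine absurd hw ?_
          have hvw : v = w := by rw [hv, hiv]
          exact hvw ▸ hvr
      have hres := ih (fun i hi => hlt i (by omega)) hcov'
      simp only [solutionWhile]
      rw [← hv, if_neg hpos]
      exact hres

-- one whole b-iteration of A's outer loop equals absStep (bisect + while loop)
lemma stepA_eq (sa r : List Int) (d : PySem.Dict Int Int) (b ans : Int)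
    (hsa : sa.Pairwise (· ≤ ·)) (hr : r.Pairwise (· ≤ ·))
    (hd : ∀ v, PySem.Dict.getD d v 0 = (r.count v : Int))
    (hsub : ∀ v, r.count v ≤ sa.count v) :
    (∀ v, PySem.Dict.getD (solutionWhile sa d (PySem.List.bisectLeft sa b)).1 v 0
        = (((absStep (r, ans) b).1).count v : Int)) ∧
    ans + (solutionWhile sa d (PySem.List.bisectLeft sa b)).2 = (absStep (r, ans) b).2 := by
  rcases PySem.List.bisectLeft_spec sa b hsa with ⟨hle, hlo, hhi⟩
  apply whileWin_eq sa r d b ans hsa hr hd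
  · intro j hj
    have hjl : j < sa.length := lt_of_lt_of_le hj hle
    refine ⟨hjl, ?_⟩
    rw [List.getD_eq_getElem _ _ hjl]
    exact hlo j hjl hj
  · intro w hw hwb
    have hcw : 0 < sa.count w :=
      lt_of_lt_of_le (List.count_pos_iff.mpr hw) (hsub w)
    rcases List.mem_iff_getElem.mp (List.count_pos_iff.mp hcw) with ⟨jw, hjw, hjweq⟩
    refine ⟨jw, ?_, by rw [List.getD_eq_getElem _ _ hjw]; exact hjweq⟩
    by_contra hge
    exact absurd (hjweq ▸ hhi jw hjw (by omega)) (by omega)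

-- Phase 1: A's outer fold over the dict equals the abstract fold over the sorted multiset
lemma foldA_eq_foldAbs (sa : List Int) (hsa : sa.Pairwise (· ≤ ·)) :
    ∀ (bs : List Int) (d : PySem.Dict Int Int) (r : List Int) (ans : Int),
    (∀ v, PySem.Dict.getD d v 0 = (r.count v : Int)) → r.Pairwise (· ≤ ·) →
    (∀ v, r.count v ≤ sa.count v) →
    (bs.foldl (fun st b =>
        let rr := solutionWhile sa st.1 (PySem.List.bisectLeft sa b)
        (rr.1, st.2 + rr.2)) (d, ans)).2
      = (bs.foldl absStep (r, ans)).2 := by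
  intro bs
  induction bs with
  | nil => intro d r ans _ _ _; rfl
  | cons b bs' ih =>
    intro d r ans hd hr hsub
    rcases stepA_eq sa r d b ans hsa hr hd hsub with ⟨hd', hans'⟩
    have hsorted' : ((absStep (r, ans) b).1).Pairwise (· ≤ ·) := by
      simp only [absStep]
      split
      · exact hr
      · exact (List.Pairwise.sublist List.erase_sublist hr)
    have hsub' : ∀ v, ((absStep (r, ans) b).1).count v ≤ sa.count v := by
      intro v
      simp only [absStep]
      split
      · exact hsub v
      · exact le_trans (List.Sublist.count_le v List.erase_sublist) (hsub v)
    simp only [List.foldl_cons]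
    rw [ih _ _ _ hd' hsorted' hsub']
    have : absStep (r, ans) b = ((absStep (r, ans) b).1, ans + (solutionWhile sa d (PySem.List.bisectLeft sa b)).2) := by
      rw [hans']
    rw [this]

lemma bfold_ge (sa : List Int) : ∀ (bs : List Int) (i : Nat), i ≤ bs.foldl (bStep sa) i := by
  intro bs
  induction bs with
  | nil => intro i; exact le_refl i
  | cons b bs' ih =>
    intro i
    have h1 : i ≤ bStep sa i b := by unfold bStep; split <;> omega
    exact le_trans h1 (ih (bStep sa i b))

-- Phase 2: the abstract fold equals B's two-pointer fold
lemma foldAbs_eq_foldB (sa : List Int) (hsa : sa.Pairwise (· ≤ ·)) :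
    ∀ (bs : List Int) (r : List Int) (i : Nat) (ans : Int),
    bs.Pairwise (· ≤ ·) → r.Pairwise (· ≤ ·) → i ≤ sa.length →
    (∀ x : Int, (∃ b ∈ bs, b ≤ x) →
       r.countP (fun a => decide (a < x)) = (sa.drop i).countP (fun a => decide (a < x))) →
    (bs.foldl absStep (r, ans)).2 = ans + ((bs.foldl (bStep sa) i : Nat) : Int) - (i : Int) := by
  intro bs
  induction bs with
  | nil => intro r i ans _ _ _ _; simp
  | cons b bs' ih =>
    intro r i ans hbs hr hi hc
    rcases List.pairwise_cons.mp hbs with ⟨hb, hbs'⟩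
    have hcb := hc b ⟨b, List.mem_cons_self, le_refl b⟩
    by_cases hk : r.countP (fun a => decide (a < b)) = 0
    · -- no remaining element below b: both sides skip
      have hnb : ¬ (i < sa.length ∧ sa.getD i 0 < b) := by
        rintro ⟨hilen, hib⟩
        have : 0 < (sa.drop i).countP (fun a => decide (a < b)) := by
          rw [List.countP_pos_iff]
          refine ⟨sa.getD i 0, ?_, by simpa using hib⟩
          rw [List.drop_eq_getElem_cons hilen, List.getD_eq_getElem _ _ hilen]
          exact List.mem_cons_self
        omega
      have hstep : absStep (r, ans) b = (r, ans) := by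
        simp only [absStep]; rw [if_pos hk]
      have hbstep : bStep sa i b = i := by
        unfold bStep; rw [if_neg hnb]
      simp only [List.foldl_cons, hstep, hbstep]
      exact ih r i ans hbs' hr hi (fun x ⟨b', hb', hbx⟩ => hc x ⟨b', List.mem_cons_of_mem _ hb', hbx⟩)
    · -- a remaining element below b exists: both sides match one element
      have hkpos : 0 < r.countP (fun a => decide (a < b)) := Nat.pos_of_ne_zero hk
      rcases max_lt_spec hr hkpos with ⟨hmmem, hmlt, _⟩
      set m := r.getD (r.countP (fun a => decide (a < b)) - 1) 0 with hm
      have hdroppos : 0 < (sa.drop i).countP (fun a => decide (a < b)) := by omega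
      have hilen : i < sa.length := by
        by_contra hge
        rw [List.drop_eq_nil_of_le (by omega)] at hdroppos
        simp at hdroppos
      have hib : sa.getD i 0 < b := by
        rcases List.countP_pos_iff.mp hdroppos with ⟨w, hw, hwb⟩
        simp only [decide_eq_true_eq] at hwb
        have hmemw : w ∈ sa.drop i := hw
        have hpw : (sa.drop i).Pairwise (· ≤ ·) := hsa.drop
        rw [List.drop_eq_getElem_cons hilen] at hmemw hpw
        rcases List.pairwise_cons.mp hpw with ⟨hhead, _⟩
        rcases List.mem_cons.mp hmemw with rfl | hmem'
        · rw [List.getD_eq_getElem _ _ hilen]; exact hwb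
        · rw [List.getD_eq_getElem _ _ hilen]
          exact lt_of_le_of_lt (hhead w hmem') hwb
      have hstep : absStep (r, ans) b = (r.erase m, ans + 1) := by
        simp only [absStep]; rw [if_neg hk]
      have hbstep : bStep sa i b = i + 1 := by
        unfold bStep; rw [if_pos ⟨hilen, hib⟩]
      have hc' : ∀ x : Int, (∃ b' ∈ bs', b' ≤ x) →
          (r.erase m).countP (fun a => decide (a < x)) = (sa.drop (i+1)).countP (fun a => decide (a < x)) := by
        rintro x ⟨b', hb', hbx⟩
        have hbex : b ≤ x := le_trans (hb b' hb') hbx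
        have hcx := hc x ⟨b', List.mem_cons_of_mem _ hb', hbx⟩
        rcases countP_erase hmmem (fun a => decide (a < x)) (by simpa using lt_of_lt_of_le hmlt hbex) with ⟨he, hpos⟩
        have hsax : decide (sa[i] < x) = true := by
          simp only [decide_eq_true_eq]
          rw [← List.getD_eq_getElem sa 0 hilen]
          exact lt_of_lt_of_le hib hbex
        have hcc : List.countP (fun a => decide (a < x)) (sa[i] :: List.drop (i+1) sa)
            = List.countP (fun a => decide (a < x)) (List.drop (i+1) sa) + 1 :=
          List.countP_cons_of_pos (p := fun a => decide (a < x)) hsax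
        rw [he, hcx, List.drop_eq_getElem_cons hilen, hcc]
        omega
      have hrer : (r.erase m).Pairwise (· ≤ ·) := List.Pairwise.sublist List.erase_sublist hr
      simp only [List.foldl_cons, hstep, hbstep]
      rw [ih (r.erase m) (i+1) (ans+1) hbs' hrer (by omega) hc']
      have hge := bfold_ge sa bs' (i+1)
      push_cast
      omega

theorem solution_eq_alt (A B : List Int) : solution A B = solution_alt A B := by
  unfold solution solution_alt
  have hsa : (PySem.List.sorted A (fun x => x)).Pairwise (· ≤ ·) :=
    PySem.List.sorted_pairwise A (fun x => x)
  have hsb : (PySem.List.sorted B (fun x => x)).Pairwise (· ≤ ·) :=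
    PySem.List.sorted_pairwise B (fun x => x)
  set sa := PySem.List.sorted A (fun x => x) with hsadef
  set sb := PySem.List.sorted B (fun x => x) with hsbdef
  have hd0 : ∀ v, PySem.Dict.getD
      (sa.foldl (fun d a => PySem.Dict.insert d a (PySem.Dict.getD d a 0 + 1)) PySem.Dict.empty) v 0
      = (sa.count v : Int) := by
    intro v
    rw [PySem.Dict.getD_foldl_insert_add_one, PySem.Dict.getD_empty]
    ring
  rw [foldA_eq_foldAbs sa hsa sb _ sa 0 hd0 hsa (fun v => le_refl _)]
  rw [foldAbs_eq_foldB sa hsa sb sa 0 0 hsb hsa (Nat.zero_le _) (by intro x _; rw [List.drop_zero])]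
  show (0:Int) + ((sb.foldl (bStep sa) 0 : Nat) : Int) - ((0:Nat) : Int) = ((sb.foldl (bStep sa) 0 : Nat) : Int)
  push_cast
  ring

-- ===== VERDICT (by name: the statement is the Claim_ definition above) =====
theorem solution_spec : Claim_equal_solution := by
  intro A B _
  unfold Spec_solution
  exact solution_eq_alt A B
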